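-- pv_equiv track=rewrite | github.com/IMaeots/Python-Taltech-course | OP/op06_air_traffic_planning/air_traffic_planning.py | create_destination_popularity_dictionary
-- ===== SOURCE A (Python) =====
-- def create_destination_popularity_dictionary(schedule: dict[str, tuple[str, str]], passenger_count: dict[str, int]) -> dict:
--     """Helper function: Return dictionary of destinations based on popularity."""
--     destination_dict = {}
--
--     for destinations in schedule.values():
--         destination = destinations[0]
--         destination_number = destinations[1]
--
--         for flight_number, count in passenger_count.items():
--             if destination_number == flight_number:
--                 if destination in destination_dict:
--                     destination_dict[destination] += count
--                 else:
--                     destination_dict[destination] = count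
--
--     return destination_dict
-- ===== SOURCE B (Python) =====
-- def create_destination_popularity_dictionary(schedule: dict[str, tuple[str, str]], passenger_count: dict[str, int]) -> dict:
--     """Helper function: Return dictionary of destinations based on popularity."""
--     groups = {}
--     for destination, flight_number in schedule.values():
--         if flight_number in passenger_count:
--             groups.setdefault(destination, []).append(passenger_count[flight_number])
--     return {destination: sum(counts) for destination, counts in groups.items()}
-- ===== Notes on version B (the rewrite author's own statement) =====
-- stated objective: faster
-- what changed: B drops A's inner scan over passenger_count entirely: it does one pass over schedule using a dict membership test/lookup to collect, per destination, the list of matching counts (setdefault-append grouping), then builds the result by summing each group, instead of A's nested loop that re-scans all passenger items for every schedule entry while incrementally updating a counter.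
import Mathlib
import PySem

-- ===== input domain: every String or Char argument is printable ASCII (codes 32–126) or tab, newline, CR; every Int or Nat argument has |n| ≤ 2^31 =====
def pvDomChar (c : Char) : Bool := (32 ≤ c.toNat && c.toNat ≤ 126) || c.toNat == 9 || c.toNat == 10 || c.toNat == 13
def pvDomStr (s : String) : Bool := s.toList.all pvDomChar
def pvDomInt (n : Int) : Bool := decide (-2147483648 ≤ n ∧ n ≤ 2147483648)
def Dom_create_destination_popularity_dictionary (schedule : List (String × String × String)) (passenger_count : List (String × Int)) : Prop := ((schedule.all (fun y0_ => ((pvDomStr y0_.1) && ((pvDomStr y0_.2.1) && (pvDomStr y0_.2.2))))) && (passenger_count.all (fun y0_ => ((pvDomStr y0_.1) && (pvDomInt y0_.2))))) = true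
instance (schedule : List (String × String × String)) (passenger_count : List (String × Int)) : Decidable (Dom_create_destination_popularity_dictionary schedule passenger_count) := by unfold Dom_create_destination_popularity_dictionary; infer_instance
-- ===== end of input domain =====

-- B replaces A's nested re-scan of passenger_count by a single indexed pass that groups counts per
-- destination and sums each group (objective: faster, O(|s|+|p|) vs O(|s|*|p|)).

-- ===== PORT A =====
def create_destination_popularity_dictionary (schedule : List (String × String × String)) (passenger_count : List (String × Int)) : List (String × Int) :=
  (schedule.foldl
    (fun destination_dict destinations =>
      let destination := destinations.2.1
      let destination_number := destinations.2.2
      passenger_count.foldl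
        (fun destination_dict fc =>
          if destination_number == fc.1 then
            if destination_dict.contains destination then
              destination_dict.modify destination 0 (· + fc.2)
            else
              destination_dict.insert destination fc.2
          else destination_dict)
        destination_dict)
    (PySem.Dict.empty : PySem.Dict String Int)).items

-- ===== PORT B =====
def create_destination_popularity_dictionary_alt (schedule : List (String × String × String)) (passenger_count : List (String × Int)) : List (String × Int) :=
  let pcd : PySem.Dict String Int := PySem.Dict.mk passenger_count
  let groups : PySem.Dict String (List Int) :=
    schedule.foldl
      (fun groups e =>
        match pcd.get? e.2.2 with          -- `flight_number in passenger_count` + `passenger_count[flight_number]`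
        | some c => groups.modify e.2.1 ([] : List Int) (fun cs => cs ++ [c])   -- setdefault(...,[]).append(c)
        | none => groups)
      PySem.Dict.empty
  groups.items.map (fun p => (p.1, p.2.sum))

-- ===== PRECONDITION & SPEC =====
-- Pre_ only requires the passenger_count association list to have pairwise-distinct keys, i.e. to
-- actually represent a Python dict (which cannot hold duplicate keys, so no Python input is lost);
-- on a duplicate-keyed list A's inner scan would add every matching pair while a dict lookup sees
-- only the first match.
def Pre_create_destination_popularity_dictionary (schedule : List (String × String × String)) (passenger_count : List (String × Int)) : Prop :=
  (passenger_count.map Prod.fst).Nodup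
instance (schedule : List (String × String × String)) (passenger_count : List (String × Int)) : Decidable (Pre_create_destination_popularity_dictionary schedule passenger_count) := by unfold Pre_create_destination_popularity_dictionary; infer_instance

def pvWitness_create_destination_popularity_dictionary : (List (String × String × String)) × (List (String × Int)) :=
  ([("k1", "Paris", "F1"), ("k2", "Oslo", "F2"), ("k3", "Paris", "F2")], [("F1", 3), ("F2", 4)])

def Spec_create_destination_popularity_dictionary (schedule : List (String × String × String)) (passenger_count : List (String × Int)) (out : List (String × Int)) : Prop := out = create_destination_popularity_dictionary_alt schedule passenger_count
instance (schedule : List (String × String × String)) (passenger_count : List (String × Int)) (out : List (String × Int)) : Decidable (Spec_create_destination_popularity_dictionary schedule passenger_count out) := by unfold Spec_create_destination_popularity_dictionary; infer_instance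

-- ===== CLAIM (what is proved, stated in full; the proofs are below) =====
def Claim_equal_create_destination_popularity_dictionary : Prop := ∀ (schedule : List (String × String × String)) (passenger_count : List (String × Int)), Dom_create_destination_popularity_dictionary schedule passenger_count → Pre_create_destination_popularity_dictionary schedule passenger_count → Spec_create_destination_popularity_dictionary schedule passenger_count (create_destination_popularity_dictionary schedule passenger_count)

-- ===== LEMMAS AND PROOFS =====

-- If no passenger pair's key matches `fn`, A's inner loop leaves the dict unchanged.
lemma innerA_nohit (fn dest : String) (pc : List (String × Int)) (h : fn ∉ pc.map Prod.fst)
    (d : PySem.Dict String Int) :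
    pc.foldl
      (fun dd fc =>
        if fn == fc.1 then
          if dd.contains dest then dd.modify dest 0 (· + fc.2) else dd.insert dest fc.2
        else dd) d = d := by
  induction pc generalizing d with
  | nil => rfl
  | cons p rest ih =>
    simp only [List.map_cons, List.mem_cons, not_or] at h
    simp only [List.foldl_cons, show (fn == p.1) = false by simpa using h.1, Bool.false_eq_true,
      if_false]
    exact ih h.2 d

-- With distinct keys, A's inner scan over passenger_count is a single dict lookup.
lemma innerA_eq (fn dest : String) (pc : List (String × Int)) (hnd : (pc.map Prod.fst).Nodup)
    (d : PySem.Dict String Int) :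
    pc.foldl
      (fun dd fc =>
        if fn == fc.1 then
          if dd.contains dest then dd.modify dest 0 (· + fc.2) else dd.insert dest fc.2
        else dd) d =
    match (PySem.Dict.mk pc).get? fn with
    | some c => if d.contains dest then d.modify dest 0 (· + c) else d.insert dest c
    | none => d := by
  induction pc generalizing d with
  | nil => rfl
  | cons p rest ih =>
    obtain ⟨pk, pv⟩ := p
    simp only [List.map_cons, List.nodup_cons] at hnd
    by_cases hk : fn = pk
    · subst hk
      simp only [List.foldl_cons, beq_self_eq_true, if_true, PySem.Dict.get?_mk_cons]
      exact innerA_nohit _ _ _ hnd.1 _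
    · simp only [List.foldl_cons, show (fn == pk) = false by simpa using hk,
        PySem.Dict.get?_mk_cons, show (pk == fn) = false by simpa using Ne.symm hk,
        Bool.false_eq_true, if_false]
      exact ih hnd.2 d

-- Main invariant: A's running counter dict and B's running group dict stay aligned
-- (same keys in the same order, A's value = sum of B's group), key by key.
lemma main_fold (pcd : PySem.Dict String Int) (sched : List (String × String × String)) :
    ∀ (d : PySem.Dict String Int) (g : PySem.Dict String (List Int)),
      d.keys = g.keys → d.keys.Nodup → (∀ k, d.getD k 0 = (g.getD k []).sum) →
      (sched.foldl
        (fun d e =>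
          match pcd.get? e.2.2 with
          | some c => if d.contains e.2.1 then d.modify e.2.1 0 (· + c) else d.insert e.2.1 c
          | none => d) d).items =
      (sched.foldl
        (fun g e =>
          match pcd.get? e.2.2 with
          | some c => g.modify e.2.1 ([] : List Int) (fun cs => cs ++ [c])
          | none => g) g).items.map (fun p => (p.1, p.2.sum)) := by
  induction sched with
  | nil =>
    intro d g hkeys hnd hval
    simp only [List.foldl_nil]
    rw [PySem.Dict.items_eq_map_keys d hnd 0,
      PySem.Dict.items_eq_map_keys g (hkeys ▸ hnd) ([] : List Int), List.map_map, hkeys]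
    exact List.map_congr_left fun k _ => by simp [hval k]
  | cons e rest ih =>
    intro d g hkeys hnd hval
    simp only [List.foldl_cons]
    cases hc : pcd.get? e.2.2 with
    | none => exact ih d g hkeys hnd hval
    | some c =>
      have hcont : d.contains e.2.1 = g.contains e.2.1 := by
        rw [PySem.Dict.contains_eq_decide_mem_keys, PySem.Dict.contains_eq_decide_mem_keys, hkeys]
      have hgkeys : (g.modify e.2.1 ([] : List Int) (fun cs => cs ++ [c])).keys =
          if g.contains e.2.1 = true then g.keys else g.keys ++ [e.2.1] := by
        rw [PySem.Dict.keys_modify]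
        by_cases h : g.contains e.2.1 = true
        · rw [PySem.Dict.keys_insert_of_contains _ _ h, if_pos h]
        · rw [PySem.Dict.keys_insert_of_not_contains _ _ (by simpa using h), if_neg h]
      by_cases h : d.contains e.2.1 = true
      · have hg : g.contains e.2.1 = true := hcont ▸ h
        simp only [h, if_true]
        refine ih _ _ ?_ ?_ ?_
        · rw [PySem.Dict.keys_modify, PySem.Dict.keys_insert_of_contains _ _ h, hgkeys, if_pos hg,
            hkeys]
        · rw [PySem.Dict.keys_modify, PySem.Dict.keys_insert_of_contains _ _ h]; exact hnd
        · intro k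
          rw [PySem.Dict.getD_modify, PySem.Dict.getD_modify]
          by_cases hke : k = e.2.1
          · simp [hke, hval e.2.1]
          · simp [hke, hval k]
      · have hg : g.contains e.2.1 = false := by rw [← hcont]; simpa using h
        simp only [h, Bool.false_eq_true, if_false]
        refine ih _ _ ?_ ?_ ?_
        · rw [PySem.Dict.keys_insert_of_not_contains _ _ (by simpa using h), hgkeys, hg, hkeys]
          simp
        · rw [PySem.Dict.keys_insert_of_not_contains _ _ (by simpa using h)]
          have hne : e.2.1 ∉ d.keys := fun hm =>
            absurd ((PySem.Dict.contains_iff_mem_keys d e.2.1).2 hm) (by simpa using h)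
          simp only [List.nodup_append, List.nodup_singleton, true_and]
          exact ⟨hnd, fun a ha b hb =>
            (List.mem_singleton.1 hb) ▸ fun he => hne (he ▸ ha)⟩
        · intro k
          rw [PySem.Dict.getD_insert, PySem.Dict.getD_modify]
          by_cases hke : k = e.2.1
          · simp [hke, PySem.Dict.getD_of_not_contains g ([] : List Int) hg]
          · simp [hke, hval k]

-- ===== VERDICT (by name: the statement is the Claim_ definition above) =====
theorem create_destination_popularity_dictionary_spec : Claim_equal_create_destination_popularity_dictionary := by
  intro schedule passenger_count _ hpre
  unfold Spec_create_destination_popularity_dictionary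
  unfold create_destination_popularity_dictionary create_destination_popularity_dictionary_alt
  have hfun :
      (fun (destination_dict : PySem.Dict String Int) (destinations : String × String × String) =>
        passenger_count.foldl
          (fun destination_dict fc =>
            if destinations.2.2 == fc.1 then
              if destination_dict.contains destinations.2.1 then
                destination_dict.modify destinations.2.1 0 (· + fc.2)
              else
                destination_dict.insert destinations.2.1 fc.2
            else destination_dict)
          destination_dict) =
      (fun (d : PySem.Dict String Int) (e : String × String × String) =>
        match (PySem.Dict.mk passenger_count).get? e.2.2 with
        | some c => if d.contains e.2.1 then d.modify e.2.1 0 (· + c) else d.insert e.2.1 c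
        | none => d) :=
    funext fun d => funext fun e => innerA_eq e.2.2 e.2.1 passenger_count hpre d
  simp only [hfun]
  exact main_fold (PySem.Dict.mk passenger_count) schedule PySem.Dict.empty PySem.Dict.empty
    (by simp [PySem.Dict.keys_empty]) (by simp [PySem.Dict.keys_empty])
    (fun k => by simp [PySem.Dict.getD_empty])
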